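-- pv_equiv track=rewrite | github.com/Evan-Maloney/find-tastic | find-api/app/vector_db.py | ngrams_with_index
-- ===== SOURCE A (Python) =====
-- def ngrams_with_index(input_string, n):
--     # Join the words into a single string
--     joined_string = " ".join(input_string)
--
--     # Create n-grams along with start and end character indices
--     ngrams_with_indices = []
--     words = joined_string.split()  # Split into words to create n-grams
--     current_index = 0  # Tracks the current index in the joined_string
--
--     for i in range(len(words) - n + 1):
--         # Create the n-gram
--         ngram = ' '.join(words[i:i + n])
--
--         # Calculate the start index based on the current index
--         start_idx = current_index
--
--         # Calculate the end index
--         end_idx = start_idx + len(ngram) - 1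
--
--         # Update current_index for the next iteration
--         # we only shift one word at a time
--         current_index += len(words[i]) + 1
--         ngrams_with_indices.append((ngram, start_idx, end_idx))
--
--     return ngrams_with_indices
-- ===== SOURCE B (Python) =====
-- def ngrams_with_index(input_string, n):
--     # Normalize once, record each word's start offset, then slice the
--     # normalized string instead of re-joining each n-gram.
--     words = " ".join(input_string).split()
--     normalized = " ".join(words)
--     starts = []
--     off = 0
--     for w in words:
--         starts.append(off)
--         off += len(w) + 1
--     result = []
--     for i in range(len(words) - n + 1):
--         end = starts[i + n - 1] + len(words[i + n - 1]) - 1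
--         result.append((normalized[starts[i]:end + 1], starts[i], end))
--     return result
-- ===== Notes on version B (the rewrite author's own statement) =====
-- stated objective: alternative
-- what changed: B normalizes the text once, precomputes each word's start offset, and extracts every n-gram by slicing the normalized string between computed offsets, instead of A's per-iteration ' '.join of a word slice with an interleaved running character counter.
import Mathlib
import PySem

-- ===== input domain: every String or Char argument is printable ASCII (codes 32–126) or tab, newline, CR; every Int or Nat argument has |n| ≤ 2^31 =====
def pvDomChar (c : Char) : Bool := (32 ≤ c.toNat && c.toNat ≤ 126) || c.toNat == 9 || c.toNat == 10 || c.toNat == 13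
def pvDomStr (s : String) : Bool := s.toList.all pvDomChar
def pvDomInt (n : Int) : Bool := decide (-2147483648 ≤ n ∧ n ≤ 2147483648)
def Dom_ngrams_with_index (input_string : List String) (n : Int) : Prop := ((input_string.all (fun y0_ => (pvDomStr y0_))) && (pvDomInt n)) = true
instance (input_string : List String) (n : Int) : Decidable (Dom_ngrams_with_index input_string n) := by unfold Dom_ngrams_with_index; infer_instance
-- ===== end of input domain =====

-- B re-implements A by slicing a once-normalized string at precomputed word offsets
-- instead of re-joining each word window with a running counter (objective: alternative).


-- ===== PORT A =====
-- A's loop body as a named step: join the word slice, record (ngram, start, end),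
-- advance the running counter by len(words[i])+1.  words[i] is pyGet?; its '.getD ""'
-- arm is only reached where Python raises IndexError (n ≤ 0), which Pre_ excludes.
def ngramsA_step (words : List String) (n : Int)
    (st : List (String × Int × Int) × Int) (i : Int) : List (String × Int × Int) × Int :=
  let ngram := PySem.Str.join " " (PySem.List.slice words (some i) (some (i + n)))
  let start_idx := st.2
  let end_idx := start_idx + PySem.Str.len ngram - 1
  let cur := st.2 + (PySem.Str.len ((PySem.List.pyGet? words i).getD "") + 1)
  (st.1 ++ [(ngram, start_idx, end_idx)], cur)

def ngrams_with_index (input_string : List String) (n : Int) : List (String × Int × Int) :=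
  let joined_string := PySem.Str.join " " input_string
  let words := PySem.Str.split₀ joined_string
  ((PySem.List.pyRange 0 ((words.length : Int) - n + 1) 1).foldl
    (ngramsA_step words n) ([], 0)).1

def ngramsB_offsStep (st : List Int × Int) (w : String) : List Int × Int :=
  (st.1 ++ [st.2], st.2 + (PySem.Str.len w + 1))

def ngramsB_emit (words : List String) (starts : List Int) (normalized : String) (n : Int)
    (acc : List (String × Int × Int)) (i : Int) : List (String × Int × Int) :=
  let e := (PySem.List.pyGet? starts (i + n - 1)).getD 0
           + (PySem.Str.len ((PySem.List.pyGet? words (i + n - 1)).getD "") - 1)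
  let s := (PySem.List.pyGet? starts i).getD 0
  acc ++ [(PySem.Str.slice normalized (some s) (some (e + 1)), s, e)]

def ngrams_with_index_alt (input_string : List String) (n : Int) : List (String × Int × Int) :=
  let words := PySem.Str.split₀ (PySem.Str.join " " input_string)
  let normalized := PySem.Str.join " " words
  let starts := (words.foldl ngramsB_offsStep ([], 0)).1
  (PySem.List.pyRange 0 ((words.length : Int) - n + 1) 1).foldl
    (ngramsB_emit words starts normalized n) []


-- ===== PRECONDITION & SPEC =====
-- Pre_ excludes exactly n ≤ 0, on which Python A raises IndexError (words[i] at i = len(words)).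
def Pre_ngrams_with_index (input_string : List String) (n : Int) : Prop := 1 ≤ n
instance (input_string : List String) (n : Int) : Decidable (Pre_ngrams_with_index input_string n) := by unfold Pre_ngrams_with_index; infer_instance
def pvWitness_ngrams_with_index : List String × Int := (["hello world", "foo"], 2)
def Spec_ngrams_with_index (input_string : List String) (n : Int) (out : List (String × Int × Int)) : Prop := out = ngrams_with_index_alt input_string n
instance (input_string : List String) (n : Int) (out : List (String × Int × Int)) : Decidable (Spec_ngrams_with_index input_string n out) := by unfold Spec_ngrams_with_index; infer_instance

-- ===== CLAIM (what is proved, stated in full; the proofs are below) =====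
def Claim_equal_ngrams_with_index : Prop := ∀ (input_string : List String) (n : Int), Dom_ngrams_with_index input_string n → Pre_ngrams_with_index input_string n → Spec_ngrams_with_index input_string n (ngrams_with_index input_string n)

-- ===== LEMMAS AND PROOFS =====
def pvJ (ps : List (List Char)) : List Char := PySem.Chars.join [' '] ps
def pvOffs (ws : List String) (j : Nat) : Nat := ((ws.take j).map (fun w => w.toList.length + 1)).sum

theorem pvJ_cons (p : List Char) (ts : List (List Char)) (h : ts ≠ []) :
    pvJ (p :: ts) = p ++ ' ' :: pvJ ts := by
  cases ts with
  | nil => exact absurd rfl h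
  | cons q rest => simp [pvJ, PySem.Chars.join_cons_cons]

theorem pvJ_len (ps : List (List Char)) (h : ps ≠ []) :
    (pvJ ps).length + 1 = (ps.map (fun p => p.length + 1)).sum := by
  induction ps with
  | nil => exact absurd rfl h
  | cons p ts ih =>
    cases ts with
    | nil => simp [pvJ, PySem.Chars.join_singleton]
    | cons q rest =>
      rw [pvJ_cons p _ (by simp)]
      have h2 := ih (by simp)
      simp only [List.map_cons, List.sum_cons, List.length_append, List.length_cons] at h2 ⊢
      omega

theorem pvJ_drop (ps qs : List (List Char)) (h : qs ≠ []) :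
    (pvJ (ps ++ qs)).drop ((ps.map (fun p => p.length + 1)).sum) = pvJ qs := by
  induction ps with
  | nil => simp
  | cons p ts ih =>
    have hne : ts ++ qs ≠ [] := by simp [h]
    rw [List.cons_append, pvJ_cons p _ hne]
    simp only [List.map_cons, List.sum_cons]
    rw [show p ++ ' ' :: pvJ (ts ++ qs) = (p ++ [' ']) ++ pvJ (ts ++ qs) by simp]
    rw [show p.length + 1 + (ts.map (fun p => p.length + 1)).sum
        = (p ++ [' ']).length + (ts.map (fun p => p.length + 1)).sum by simp]
    rw [List.drop_length_add_append]
    exact ih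

theorem pvJ_take (ps qs : List (List Char)) (h : ps ≠ []) :
    (pvJ (ps ++ qs)).take ((pvJ ps).length) = pvJ ps := by
  induction ps with
  | nil => exact absurd rfl h
  | cons p ts ih =>
    cases ts with
    | nil =>
      cases qs with
      | nil => simp
      | cons q rest =>
        rw [List.singleton_append, pvJ_cons p (q :: rest) (by simp)]
        rw [show p ++ ' ' :: pvJ (q :: rest) = p ++ (' ' :: pvJ (q :: rest)) from rfl]
        simp [pvJ, PySem.Chars.join_singleton]
    | cons t rest =>
      rw [List.cons_append, pvJ_cons p _ (by simp), pvJ_cons p _ (by simp)]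
      have hi := ih (by simp)
      rw [show p ++ ' ' :: pvJ ((t :: rest) ++ qs) = (p ++ [' ']) ++ pvJ ((t :: rest) ++ qs) by simp]
      rw [show (p ++ ' ' :: pvJ (t :: rest)).length = (p ++ [' ']).length + (pvJ (t :: rest)).length by simp; omega]
      rw [List.take_length_add_append, hi]
      simp

theorem pvOffs_succ (ws : List String) (a : Nat) (h : a < ws.length) :
    pvOffs ws (a + 1) = pvOffs ws a + (ws[a].toList.length + 1) := by
  unfold pvOffs
  rw [List.take_succ_eq_append_getElem h, List.map_append, List.sum_append]
  simp

def pvGram (ws : List String) (n' i : Nat) : String :=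
  PySem.Str.join " " ((ws.drop i).take n')

def pvG (ws : List String) (n' i : Nat) : String × Int × Int :=
  (pvGram ws n' i, (pvOffs ws i : Int),
   (pvOffs ws i : Int) + PySem.Str.len (pvGram ws n' i) - 1)

theorem pvWindow_ne (ws : List String) (n' i : Nat) (hn : 1 ≤ n') (hi : i + n' ≤ ws.length) :
    ((ws.drop i).take n').map String.toList ≠ [] := by
  simp only [ne_eq, List.map_eq_nil_iff, List.take_eq_nil_iff, List.drop_eq_nil_iff]
  omega

theorem pvGram_toList (ws : List String) (n' i : Nat) :
    (pvGram ws n' i).toList = pvJ (((ws.drop i).take n').map String.toList) := by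
  simp [pvGram, PySem.Str.toList_join, pvJ]

theorem pvGram_len (ws : List String) (n' i : Nat) (hn : 1 ≤ n') (hi : i + n' ≤ ws.length) :
    pvOffs ws i + ((pvGram ws n' i).toList.length + 1) = pvOffs ws (i + n') := by
  rw [pvGram_toList, pvJ_len _ (pvWindow_ne ws n' i hn hi)]
  unfold pvOffs
  rw [List.take_add, List.map_append, List.sum_append, List.map_map]
  have hfg : ((fun p : List Char => p.length + 1) ∘ String.toList) = (fun w : String => w.toList.length + 1) := by
    funext w; simp
  rw [hfg]

theorem pvOffs_lb (ws : List String) (n' i : Nat) (hn : 1 ≤ n') (hi : i + n' ≤ ws.length) :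
    pvOffs ws i + 1 ≤ pvOffs ws (i + n') := by
  have := pvGram_len ws n' i hn hi
  omega

theorem pvGram_slice (ws : List String) (n' i : Nat) (hn : 1 ≤ n') (hi : i + n' ≤ ws.length) :
    PySem.Str.slice (PySem.Str.join " " ws) (some (pvOffs ws i : Int))
      (some ((pvOffs ws (i + n') : Int) - 1)) = pvGram ws n' i := by
  apply String.toList_inj.mp
  have hlb := pvOffs_lb ws n' i hn hi
  rw [show ((pvOffs ws (i + n') : Int) - 1) = ((pvOffs ws (i + n') - 1 : Nat) : Int) by omega]
  rw [PySem.Str.toList_slice, PySem.Chars.slice_eq_listSlice, PySem.List.slice_natCast]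
  have hsplit : ws.map String.toList
      = (ws.take i).map String.toList
        ++ (((ws.drop i).take n').map String.toList ++ (ws.drop (i + n')).map String.toList) := by
    rw [← List.map_append, ← List.map_append]
    congr 1
    rw [← List.append_assoc, ← List.take_add, List.take_append_drop]
  rw [PySem.Str.toList_join, show (" ").toList = [' '] from rfl, ← pvJ, hsplit]
  have hS : ((( ws.take i).map String.toList).map (fun p => p.length + 1)).sum = pvOffs ws i := by
    rw [List.map_map]; rfl
  have hqs : ((ws.drop i).take n').map String.toList ++ (ws.drop (i + n')).map String.toList ≠ [] := by
    simp only [ne_eq, List.append_eq_nil_iff, not_and_or]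
    exact Or.inl (pvWindow_ne ws n' i hn hi)
  rw [← hS, pvJ_drop _ _ hqs]
  have hlen := pvGram_len ws n' i hn hi
  rw [pvGram_toList] at hlen
  rw [hS, show pvOffs ws (i + n') - 1 - pvOffs ws i
      = (pvJ (((ws.drop i).take n').map String.toList)).length by omega]
  rw [pvJ_take _ _ (pvWindow_ne ws n' i hn hi)]
  exact (pvGram_toList ws n' i).symm

theorem pvOffs_zero (ws : List String) : pvOffs ws 0 = 0 := by simp [pvOffs]

theorem pvAloop (ws : List String) (n' : Nat) (hn : 1 ≤ n') :
    ∀ (c a : Nat) (acc : List (String × Int × Int)), a + c + n' ≤ ws.length + 1 →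
    ((List.range' a c).map (fun (k : Nat) => (k : Int))).foldl (ngramsA_step ws (n' : Int))
      (acc, (pvOffs ws a : Int))
    = (acc ++ (List.range' a c).map (pvG ws n'), (pvOffs ws (a + c) : Int)) := by
  intro c
  induction c with
  | zero => intro a acc _; simp
  | succ c ih =>
    intro a acc hbound
    have ha : a < ws.length := by omega
    rw [List.range'_succ]
    simp only [List.map_cons, List.foldl_cons]
    have hstep : ngramsA_step ws (n' : Int) (acc, (pvOffs ws a : Int)) (a : Int)
        = (acc ++ [pvG ws n' a], (pvOffs ws (a + 1) : Int)) := by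
      unfold ngramsA_step
      simp only [PySem.List.slice_natCast_add, PySem.List.pyGet?_natCast,
        List.getElem?_eq_getElem ha, Option.getD_some, pvG, pvGram, Prod.mk.injEq]
      refine ⟨by trivial, ?_⟩
      rw [pvOffs_succ ws a ha, PySem.Str.len_eq]
      push_cast
      ring
    rw [hstep, ih (a + 1) (acc ++ [pvG ws n' a]) (by omega)]
    simp only [Prod.mk.injEq]
    refine ⟨by simp, by rw [show a + 1 + c = a + (c + 1) from by omega]⟩

theorem pvBstarts (ws : List String) :
    ∀ (t : List String) (a : Nat) (acc : List Int), t = ws.drop a →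
    (t.foldl ngramsB_offsStep (acc, (pvOffs ws a : Int))).1
    = acc ++ (List.range' a t.length).map (fun j => (pvOffs ws j : Int)) := by
  intro t
  induction t with
  | nil => intro a acc _; simp
  | cons w t' ih =>
    intro a acc ht
    have ha : a < ws.length := by
      by_contra h
      rw [List.drop_eq_nil_of_le (by omega)] at ht
      exact List.cons_ne_nil _ _ ht
    have hw : w = ws[a] := by
      have h0 := congrArg (fun l => l[0]?) ht
      simpa [List.getElem?_drop, List.getElem?_eq_getElem ha] using h0
    have ht' : t' = ws.drop (a + 1) := by
      have : (ws.drop a).tail = ws.drop (a + 1) := by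
        rw [← List.drop_drop]
        simp
      rw [← this, ← ht, List.tail_cons]
    simp only [List.foldl_cons]
    have hstep : ngramsB_offsStep (acc, (pvOffs ws a : Int)) w
        = (acc ++ [(pvOffs ws a : Int)], (pvOffs ws (a + 1) : Int)) := by
      unfold ngramsB_offsStep
      rw [pvOffs_succ ws a ha, PySem.Str.len_eq, hw]
      push_cast
      ring_nf
    rw [hstep, ih (a + 1) _ ht']
    rw [List.length_cons, List.range'_succ]
    simp

theorem pvBemit (ws : List String) (n' k : Nat) (hn : 1 ≤ n') (hk : k + n' ≤ ws.length)
    (acc : List (String × Int × Int)) :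
    ngramsB_emit ws ((List.range ws.length).map (fun j => (pvOffs ws j : Int)))
      (PySem.Str.join " " ws) (n' : Int) acc (k : Int)
    = acc ++ [pvG ws n' k] := by
  have hj : k + n' - 1 < ws.length := by omega
  have hk' : k < ws.length := by omega
  have hjj : (k + n' - 1) + 1 = k + n' := by omega
  unfold ngramsB_emit
  rw [show (k : Int) + (n' : Int) - 1 = ((k + n' - 1 : Nat) : Int) by omega]
  rw [PySem.List.pyGet?_natCast, PySem.List.pyGet?_natCast, PySem.List.pyGet?_natCast]
  simp only [List.getElem?_map, List.getElem?_range, hj, hk',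
    Option.map_some, Option.getD_some, List.getElem?_eq_getElem hj, PySem.Str.len_eq]
  have hsucc := pvOffs_succ ws (k + n' - 1) hj
  rw [hjj] at hsucc
  have hgl := pvGram_len ws n' k hn hk
  have he : (pvOffs ws (k + n' - 1) : Int) + ((ws[k + n' - 1].toList.length : Int) - 1)
      = (pvOffs ws (k + n') : Int) - 2 := by omega
  rw [he]
  have he1 : (pvOffs ws (k + n') : Int) - 2 + 1 = (pvOffs ws (k + n') : Int) - 1 := by ring
  rw [he1, pvGram_slice ws n' k hn hk]
  unfold pvG
  rw [PySem.Str.len_eq]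
  have hfinal : (pvOffs ws (k + n') : Int) - 2 = (pvOffs ws k : Int) + ((pvGram ws n' k).toList.length : Int) - 1 := by omega
  rw [hfinal]


theorem pvBfold (ws : List String) (n' : Nat) (hn : 1 ≤ n') :
    ∀ (ks : List Nat) (acc : List (String × Int × Int)), (∀ k ∈ ks, k + n' ≤ ws.length) →
    (ks.map (fun (k : Nat) => (k : Int))).foldl
      (ngramsB_emit ws ((List.range ws.length).map (fun j => (pvOffs ws j : Int)))
        (PySem.Str.join " " ws) (n' : Int)) acc
    = acc ++ ks.map (pvG ws n') := by
  intro ks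
  induction ks with
  | nil => intro acc _; simp
  | cons k ks ih =>
    intro acc hmem
    simp only [List.map_cons, List.foldl_cons]
    rw [pvBemit ws n' k hn (hmem k (by simp)) acc, ih _ (fun x hx => hmem x (by simp [hx]))]
    simp

theorem pvA_eq (ws : List String) (n : Int) (hn : 1 ≤ n) :
    ((PySem.List.pyRange 0 ((ws.length : Int) - n + 1) 1).foldl (ngramsA_step ws n) ([], 0)).1
    = (List.range (ws.length + 1 - n.toNat)).map (pvG ws n.toNat) := by
  obtain ⟨n', rfl⟩ : ∃ n' : Nat, n = (n' : Int) := ⟨n.toNat, by omega⟩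
  have hn' : 1 ≤ n' := by omega
  simp only [Int.toNat_natCast]
  by_cases hm : n' ≤ ws.length + 1
  · have hb : ((ws.length : Int) - (n' : Int) + 1) = ((ws.length + 1 - n' : Nat) : Int) := by omega
    rw [PySem.List.pyRange_one, hb]
    have h2 : ((((ws.length + 1 - n' : Nat) : Int)) - 0).toNat = ws.length + 1 - n' := by omega
    rw [h2]
    have hmap : (List.range (ws.length + 1 - n')).map (fun k => (0 : Int) + (k : Nat))
        = (List.range' 0 (ws.length + 1 - n')).map (fun (k : Nat) => (k : Int)) := by
      rw [← List.range_eq_range']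
      simp
    rw [hmap]
    have hinit : (([], 0) : List (String × Int × Int) × Int) = ([], (pvOffs ws 0 : Int)) := by
      simp [pvOffs_zero]
    rw [hinit, pvAloop ws n' hn' (ws.length + 1 - n') 0 [] (by omega)]
    simp [← List.range_eq_range']
  · rw [PySem.List.pyRange_one_eq_nil (by omega)]
    have h0 : ws.length + 1 - n' = 0 := by omega
    simp [h0]

theorem pvB_eq (ws : List String) (n : Int) (hn : 1 ≤ n) :
    (PySem.List.pyRange 0 ((ws.length : Int) - n + 1) 1).foldl
      (ngramsB_emit ws ((ws.foldl ngramsB_offsStep ([], 0)).1) (PySem.Str.join " " ws) n) []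
    = (List.range (ws.length + 1 - n.toNat)).map (pvG ws n.toNat) := by
  obtain ⟨n', rfl⟩ : ∃ n' : Nat, n = (n' : Int) := ⟨n.toNat, by omega⟩
  have hn' : 1 ≤ n' := by omega
  simp only [Int.toNat_natCast]
  have hstarts : (ws.foldl ngramsB_offsStep ([], 0)).1
      = (List.range ws.length).map (fun j => (pvOffs ws j : Int)) := by
    have hinit : (([], 0) : List Int × Int) = ([], (pvOffs ws 0 : Int)) := by
      simp [pvOffs_zero]
    rw [hinit, pvBstarts ws ws 0 [] (by simp)]
    simp [← List.range_eq_range']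
  rw [hstarts]
  by_cases hm : n' ≤ ws.length + 1
  · have hb : ((ws.length : Int) - (n' : Int) + 1) = ((ws.length + 1 - n' : Nat) : Int) := by omega
    rw [PySem.List.pyRange_one, hb]
    have h2 : ((((ws.length + 1 - n' : Nat) : Int)) - 0).toNat = ws.length + 1 - n' := by omega
    rw [h2]
    have hmap : (List.range (ws.length + 1 - n')).map (fun k => (0 : Int) + (k : Nat))
        = (List.range (ws.length + 1 - n')).map (fun (k : Nat) => (k : Int)) := by
      simp
    rw [hmap, pvBfold ws n' hn' (List.range (ws.length + 1 - n')) []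
      (fun k hk => by simp at hk; omega)]
    simp
  · rw [PySem.List.pyRange_one_eq_nil (by omega)]
    have h0 : ws.length + 1 - n' = 0 := by omega
    simp [h0]


-- ===== VERDICT (by name: the statement is the Claim_ definition above) =====
theorem ngrams_with_index_spec : Claim_equal_ngrams_with_index := by
  intro input_string n _ hpre
  have hn : 1 ≤ n := hpre
  unfold Spec_ngrams_with_index ngrams_with_index ngrams_with_index_alt
  rw [pvA_eq _ n hn, pvB_eq _ n hn]
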